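-- pv_equiv track=rewrite | github.com/mkierc/advent-of-code | 2015/src/day_09/part_1_part_2.py | find_routes
-- ===== SOURCE A (Python) =====
-- def find_routes(current_routes, available_destinations):
--     routes = []
--
--     for destination in available_destinations:
--         new_available_destinations = available_destinations[:]
--         new_routes = current_routes[:]
--
--         new_routes.append(destination)
--         new_available_destinations.remove(destination)
--
--         if not new_available_destinations:
--             routes.append(new_routes + new_available_destinations)
--
--         routes.extend(find_routes(new_routes, new_available_destinations))
--
--     return routes
-- ===== SOURCE B (Python) =====
-- def find_routes(current_routes, available_destinations):
--     level = [(list(current_routes), list(available_destinations))]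
--     for _ in range(len(available_destinations)):
--         new_level = []
--         for route, rest in level:
--             for destination in rest:
--                 remaining = list(rest)
--                 remaining.remove(destination)
--                 new_level.append((route + [destination], remaining))
--         level = new_level
--     return [route for route, _ in level]
-- ===== Notes on version B (the rewrite author's own statement) =====
-- stated objective: alternative
-- what changed: Replaces A's depth-first recursion with an iterative breadth-first worklist: a level of (route, remaining) states is expanded len(available_destinations) times and the final level's routes are returned.
-- outside the precondition, e.g. on find_routes(['x'], []): A returns [], B returns [['x']]
import Mathlib
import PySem

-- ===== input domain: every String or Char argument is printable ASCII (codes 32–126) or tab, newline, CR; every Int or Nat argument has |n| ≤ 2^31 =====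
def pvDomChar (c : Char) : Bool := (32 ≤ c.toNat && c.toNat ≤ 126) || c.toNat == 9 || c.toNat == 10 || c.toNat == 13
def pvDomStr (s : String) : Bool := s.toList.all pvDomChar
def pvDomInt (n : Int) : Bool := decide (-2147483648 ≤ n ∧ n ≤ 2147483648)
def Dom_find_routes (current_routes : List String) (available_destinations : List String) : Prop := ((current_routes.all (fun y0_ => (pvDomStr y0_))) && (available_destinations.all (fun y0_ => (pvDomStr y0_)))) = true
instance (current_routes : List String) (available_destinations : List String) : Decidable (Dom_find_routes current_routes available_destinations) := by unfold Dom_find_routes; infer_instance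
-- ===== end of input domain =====

-- B replaces A's depth-first recursion with an iterative breadth-first worklist of
-- (route, remaining) states; equal output everywhere except the empty destination list.


-- ===== PORT A =====
-- literal transliteration of A: loop over available_destinations accumulating 'routes';
-- 'new_available_destinations.remove(destination)' = List.erase (destination is a member, so
-- Python's ValueError cannot occur); a.attach is used only to carry membership for termination.
def find_routes (current_routes : List String) (available_destinations : List String) : List (List String) :=
  available_destinations.attach.foldl
    (fun routes d =>
      let new_available_destinations := available_destinations.erase d.1
      let new_routes := current_routes ++ [d.1]
      let routes := if new_available_destinations = [] then
          routes ++ [new_routes ++ new_available_destinations] else routes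
      routes ++ find_routes new_routes new_available_destinations)
    []
termination_by available_destinations.length
decreasing_by
  have := List.length_erase_of_mem d.2
  have h2 : 0 < available_destinations.length := List.length_pos_of_mem d.2
  simp only [this]; omega

-- ===== PORT B =====
-- one expansion step of Source B's inner two loops:
-- 'for route, rest in level: for destination in rest: new_level.append((route + [destination], remaining))'
def pvStep (level : List (List String × List String)) : List (List String × List String) :=
  level.flatMap (fun rr => rr.2.map (fun destination => (rr.1 ++ [destination], rr.2.erase destination)))

def find_routes_alt (current_routes : List String) (available_destinations : List String) : List (List String) :=
  let level := (List.range available_destinations.length).foldl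
    (fun level _ => pvStep level) [(current_routes, available_destinations)]
  level.map (fun rr => rr.1)

-- ===== PRECONDITION & SPEC =====
-- Pre_ excludes only the empty destination list, the degenerate call on which A returns []
-- (its loop never runs) while B returns the single unextended route; both are defensible
-- answers for 'all routes through no destinations'.
def Pre_find_routes (current_routes : List String) (available_destinations : List String) : Prop :=
  available_destinations ≠ []
instance (current_routes : List String) (available_destinations : List String) : Decidable (Pre_find_routes current_routes available_destinations) := by unfold Pre_find_routes; infer_instance

def pvWitness_find_routes : List String × List String := (["start"], ["a", "b", "a"])

def Spec_find_routes (current_routes : List String) (available_destinations : List String) (out : List (List String)) : Prop := out = find_routes_alt current_routes available_destinations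
instance (current_routes : List String) (available_destinations : List String) (out : List (List String)) : Decidable (Spec_find_routes current_routes available_destinations out) := by unfold Spec_find_routes; infer_instance

-- ===== CLAIM (what is proved, stated in full; the proofs are below) =====
def Claim_equal_find_routes : Prop := ∀ (current_routes : List String) (available_destinations : List String), Dom_find_routes current_routes available_destinations → Pre_find_routes current_routes available_destinations → Spec_find_routes current_routes available_destinations (find_routes current_routes available_destinations)

-- ===== LEMMAS AND PROOFS =====

theorem attach_flatMap {α β : Type} (l : List α) (f : α → List β) :
    l.attach.flatMap (fun x => f x.1) = l.flatMap f := by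
  conv_rhs => rw [← List.attach_map_subtype_val l, List.flatMap_map]

theorem step_singleton (p : List String × List String) :
    pvStep [p] = p.2.map (fun d => (p.1 ++ [d], p.2.erase d)) := by
  unfold pvStep; simp

theorem step_eq_flatMap (xs : List (List String × List String)) :
    pvStep xs = xs.flatMap (fun p => pvStep [p]) := by
  unfold pvStep; simp

theorem iter_flatMap (n : Nat) (xs : List (List String × List String)) :
    pvStep^[n] xs = xs.flatMap (fun p => pvStep^[n] [p]) := by
  induction n generalizing xs with
  | zero => simp
  | succ n ih =>
    calc pvStep^[n + 1] xs = pvStep^[n] (pvStep xs) := Function.iterate_succ_apply _ _ _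
      _ = (pvStep xs).flatMap (fun q => pvStep^[n] [q]) := ih _
      _ = xs.flatMap (fun p => (pvStep [p]).flatMap (fun q => pvStep^[n] [q])) := by
          rw [step_eq_flatMap, List.flatMap_assoc]
      _ = xs.flatMap (fun p => pvStep^[n] (pvStep [p])) := by simp only [← ih]
      _ = xs.flatMap (fun p => pvStep^[n + 1] [p]) := by
          simp only [Function.iterate_succ_apply]

theorem foldl_range_iterate (n : Nat) (x : List (List String × List String)) :
    (List.range n).foldl (fun level _ => pvStep level) x = pvStep^[n] x := by
  induction n with
  | zero => simp
  | succ n ih =>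
    rw [List.range_succ, List.foldl_append]
    simp [ih, Function.iterate_succ_apply']

theorem find_routes_eq (c a : List String) :
    find_routes c a = a.flatMap (fun d =>
      (if a.erase d = [] then [c ++ [d]] else []) ++ find_routes (c ++ [d]) (a.erase d)) := by
  rw [find_routes]
  have hfun : (fun (routes : List (List String)) (d : {x // x ∈ a}) =>
      let new_available_destinations := a.erase d.1
      let new_routes := c ++ [d.1]
      let routes := if new_available_destinations = [] then
          routes ++ [new_routes ++ new_available_destinations] else routes
      routes ++ find_routes new_routes new_available_destinations)
      = (fun routes d => routes ++
          ((if a.erase d.1 = [] then [c ++ [d.1]] else []) ++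
            find_routes (c ++ [d.1]) (a.erase d.1))) := by
    funext routes d
    by_cases hh : a.erase d.1 = [] <;> simp [hh]
  rw [hfun, PySem.List.foldl_append_eq_flatMap, List.nil_append]
  exact attach_flatMap a
    (fun d => (if a.erase d = [] then [c ++ [d]] else []) ++ find_routes (c ++ [d]) (a.erase d))

theorem find_routes_nil (c : List String) : find_routes c [] = [] := by
  rw [find_routes_eq]; simp

-- the final level of B's breadth-first expansion carries exactly A's depth-first output
theorem levels (n : Nat) : ∀ (rest r : List String), rest.length = n →
    (pvStep^[n] [(r, rest)]).map (fun rr => rr.1)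
      = if rest = [] then [r] else find_routes r rest := by
  induction n with
  | zero =>
    intro rest r h
    rw [List.length_eq_zero_iff.mp h]
    simp
  | succ n ih =>
    intro rest r h
    have hne : rest ≠ [] := by intro hh; rw [hh] at h; simp at h
    rw [if_neg hne, Function.iterate_succ_apply, step_singleton]
    simp only
    rw [iter_flatMap, List.flatMap_map, List.map_flatMap, find_routes_eq]
    apply List.flatMap_congr
    intro d hd
    have hlen : (rest.erase d).length = n := by
      rw [List.length_erase_of_mem hd, h]; omega
    rw [ih (rest.erase d) (r ++ [d]) hlen]
    by_cases hz : rest.erase d = [] <;> simp [hz, find_routes_nil]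

-- ===== VERDICT (by name: the statement is the Claim_ definition above) =====
theorem find_routes_spec : Claim_equal_find_routes := by
  intro c a _ hpre
  unfold Spec_find_routes find_routes_alt
  rw [foldl_range_iterate, levels a.length a c rfl, if_neg hpre]
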